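-- pv_equiv track=rewrite | github.com/christianp/excursions | puzzlebomb-shapes/puzzlebomb-shapes.py | detect_edges
-- ===== SOURCE A (Python) =====
-- def detect_edges(grid):
-- 	out=[[0,0,0],[0,0,0],[0,0,0]]
-- 	for x in range(3):
-- 		# there's an edge if two adjacent squares are different
--
-- 		# do a row
-- 		a = grid[x][0] != grid[x][1]
-- 		b = grid[x][1] != grid[x][2]
-- 		out[x][0] += a + grid[x][0]
-- 		out[x][1] += a+b
-- 		out[x][2] += b + grid[x][2]
--
-- 		# do a column
-- 		a = grid[0][x] != grid[1][x]
-- 		b = grid[1][x] != grid[2][x]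
-- 		out[0][x] += a + grid[0][x]
-- 		out[1][x] += a+b
-- 		out[2][x] += b + grid[2][x]
-- 	return out
-- ===== SOURCE B (Python) =====
-- def detect_edges(grid):
--     out = []
--     for i in range(3):
--         row = []
--         for j in range(3):
--             v = 0
--             for di, dj in ((-1, 0), (1, 0), (0, -1), (0, 1)):
--                 ni, nj = i + di, j + dj
--                 if 0 <= ni < 3 and 0 <= nj < 3:
--                     v += grid[i][j] != grid[ni][nj]
--                 else:
--                     v += grid[i][j]
--             row.append(v)
--         out.append(row)
--     return out
-- ===== Notes on version B (the rewrite author's own statement) =====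
-- stated objective: alternative
-- what changed: Replaces A's two accumulation passes (row pass + column pass mutating a preinitialised 3x3 array) by a single cell-centred pass that builds each output entry directly from a scan of the four orthogonal neighbours, adding the inequality bit for in-grid neighbours and the cell value itself for out-of-bounds ones.
import Mathlib
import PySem

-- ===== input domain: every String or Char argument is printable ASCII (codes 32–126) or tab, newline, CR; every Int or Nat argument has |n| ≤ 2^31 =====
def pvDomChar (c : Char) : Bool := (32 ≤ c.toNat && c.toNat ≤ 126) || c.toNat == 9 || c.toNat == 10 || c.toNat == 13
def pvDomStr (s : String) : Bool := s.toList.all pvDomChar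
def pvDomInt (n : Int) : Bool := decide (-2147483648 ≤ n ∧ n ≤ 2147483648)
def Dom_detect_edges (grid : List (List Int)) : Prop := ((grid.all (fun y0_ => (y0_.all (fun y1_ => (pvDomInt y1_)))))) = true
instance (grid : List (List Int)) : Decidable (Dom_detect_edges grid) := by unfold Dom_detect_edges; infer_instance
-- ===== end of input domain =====

-- B builds each output cell in one neighbour scan instead of A's separate row/column accumulation passes; same cost, different decomposition.


-- ===== PORT A =====
-- grid[i][j] for int indices; exact under Pre_ (all indices read are in range, so no IndexError)
def pvG (grid : List (List Int)) (i j : Int) : Int :=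
  (PySem.List.pyGet? ((PySem.List.pyGet? grid i).getD []) j).getD 0

-- bool-to-int coercion Python applies when adding a comparison result
def pvB (b : Bool) : Int := if b then 1 else 0

-- out[i][j] += d on the 3x3 accumulator
def pvAdd (out : List (List Int)) (i j : Nat) (d : Int) : List (List Int) :=
  out.modify i (fun row => row.modify j (fun v => v + d))

def detect_edges (grid : List (List Int)) : List (List Int) :=
  let out : List (List Int) := [[0,0,0],[0,0,0],[0,0,0]]
  (PySem.List.pyRange 0 3 1).foldl (fun out x =>
    -- do a row
    let a := pvB (pvG grid x 0 != pvG grid x 1)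
    let b := pvB (pvG grid x 1 != pvG grid x 2)
    let out := pvAdd out x.toNat 0 (a + pvG grid x 0)
    let out := pvAdd out x.toNat 1 (a + b)
    let out := pvAdd out x.toNat 2 (b + pvG grid x 2)
    -- do a column
    let a := pvB (pvG grid 0 x != pvG grid 1 x)
    let b := pvB (pvG grid 1 x != pvG grid 2 x)
    let out := pvAdd out 0 x.toNat (a + pvG grid 0 x)
    let out := pvAdd out 1 x.toNat (a + b)
    let out := pvAdd out 2 x.toNat (b + pvG grid 2 x)
    out) out

-- ===== PORT B =====
def detect_edges_alt (grid : List (List Int)) : List (List Int) :=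
  (List.range 3).map (fun i =>
    (List.range 3).map (fun j =>
      [(-1, 0), (1, 0), (0, -1), (0, 1)].foldl (fun v (d : Int × Int) =>
        let ni : Int := (i : Int) + d.1
        let nj : Int := (j : Int) + d.2
        if 0 ≤ ni ∧ ni < 3 ∧ 0 ≤ nj ∧ nj < 3 then
          v + pvB (pvG grid i j != pvG grid ni nj)
        else
          v + pvG grid i j) 0))

-- ===== PRECONDITION & SPEC =====
-- Pre_: A raises IndexError unless the grid has at least 3 rows and its first 3 rows have at least 3 entries.
def Pre_detect_edges (grid : List (List Int)) : Prop :=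
  3 ≤ grid.length ∧ 3 ≤ (grid.getD 0 []).length ∧ 3 ≤ (grid.getD 1 []).length ∧ 3 ≤ (grid.getD 2 []).length
instance (grid : List (List Int)) : Decidable (Pre_detect_edges grid) := by unfold Pre_detect_edges; infer_instance
def pvWitness_detect_edges : List (List Int) := [[0,1,0],[1,0,1],[0,1,0]]

def Spec_detect_edges (grid : List (List Int)) (out : List (List Int)) : Prop := out = detect_edges_alt grid
instance (grid : List (List Int)) (out : List (List Int)) : Decidable (Spec_detect_edges grid out) := by unfold Spec_detect_edges; infer_instance

-- ===== CLAIM (what is proved, stated in full; the proofs are below) =====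
def Claim_equal_detect_edges : Prop := ∀ (grid : List (List Int)), Dom_detect_edges grid → Pre_detect_edges grid → Spec_detect_edges grid (detect_edges grid)

-- ===== LEMMAS AND PROOFS =====
lemma pvRange3 : PySem.List.pyRange 0 3 1 = [0, 1, 2] := by decide

lemma key (a0 a1 a2 b0 b1 b2 c0 c1 c2 : Int) (ta tb tc : List Int) (rest : List (List Int)) :
    detect_edges ((a0::a1::a2::ta)::(b0::b1::b2::tb)::(c0::c1::c2::tc)::rest)
      = detect_edges_alt ((a0::a1::a2::ta)::(b0::b1::b2::tb)::(c0::c1::c2::tc)::rest) := by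
  set G : List (List Int) := (a0::a1::a2::ta)::(b0::b1::b2::tb)::(c0::c1::c2::tc)::rest with hG
  have e00 : pvG G (0:Int) (0:Int) = a0 := by
    simp [hG, pvG, PySem.List.pyGet?, PySem.List.pyIdx?]; split_ifs <;> simp_all <;> omega
  have e01 : pvG G (0:Int) (1:Int) = a1 := by
    simp [hG, pvG, PySem.List.pyGet?, PySem.List.pyIdx?]; split_ifs <;> simp_all <;> omega
  have e02 : pvG G (0:Int) (2:Int) = a2 := by
    simp [hG, pvG, PySem.List.pyGet?, PySem.List.pyIdx?]; split_ifs <;> simp_all <;> omega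
  have e10 : pvG G (1:Int) (0:Int) = b0 := by
    simp [hG, pvG, PySem.List.pyGet?, PySem.List.pyIdx?]; split_ifs <;> simp_all <;> omega
  have e11 : pvG G (1:Int) (1:Int) = b1 := by
    simp [hG, pvG, PySem.List.pyGet?, PySem.List.pyIdx?]; split_ifs <;> simp_all <;> omega
  have e12 : pvG G (1:Int) (2:Int) = b2 := by
    simp [hG, pvG, PySem.List.pyGet?, PySem.List.pyIdx?]; split_ifs <;> simp_all <;> omega
  have e20 : pvG G (2:Int) (0:Int) = c0 := by
    simp [hG, pvG, PySem.List.pyGet?, PySem.List.pyIdx?]; split_ifs <;> simp_all <;> omega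
  have e21 : pvG G (2:Int) (1:Int) = c1 := by
    simp [hG, pvG, PySem.List.pyGet?, PySem.List.pyIdx?]; split_ifs <;> simp_all <;> omega
  have e22 : pvG G (2:Int) (2:Int) = c2 := by
    simp [hG, pvG, PySem.List.pyGet?, PySem.List.pyIdx?]; split_ifs <;> simp_all <;> omega
  simp only [detect_edges, detect_edges_alt, pvRange3, pvB, pvAdd, List.range_succ, List.range_zero,
    List.foldl, List.nil_append, List.cons_append, List.modify, List.modifyTailIdx, Int.toNat]
  norm_num [List.modifyTailIdx.go, e00, e01, e02, e10, e11, e12, e20, e21, e22]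
  simp only [@eq_comm Int]
  ring_nf
  simp

-- ===== VERDICT (by name: the statement is the Claim_ definition above) =====
theorem detect_edges_spec : Claim_equal_detect_edges := by
  intro grid _ hpre
  obtain ⟨hl, h0, h1, h2⟩ := hpre
  match grid, hl, h0, h1, h2 with
  | (a0::a1::a2::ta)::(b0::b1::b2::tb)::(c0::c1::c2::tc)::rest, _, _, _, _ =>
    exact key a0 a1 a2 b0 b1 b2 c0 c1 c2 ta tb tc rest
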